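-- pv_equiv track=rewrite | github.com/kaasgz/magistraDarbs | src/demo/generate_demo_instances.py | _distribute_round_slots
-- ===== SOURCE A (Python) =====
-- def _distribute_round_slots(required_rounds: int, slot_count: int) -> list[int]:
--
--     # Spread required rounds across the available slot horizon.
--     extra_slots = slot_count - required_rounds
--     gaps_after_round = [0] * required_rounds
--     for extra_index in range(extra_slots):
--         target_index = ((extra_index + 1) * required_rounds) // (extra_slots + 1) - 1
--         gaps_after_round[max(0, target_index)] += 1
--
--     slot_indices: list[int] = []
--     current_slot = 0
--     for round_index in range(required_rounds):
--         slot_indices.append(current_slot)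
--         current_slot += 1 + gaps_after_round[round_index]
--     return slot_indices
-- ===== SOURCE B (Python) =====
-- def _distribute_round_slots(required_rounds: int, slot_count: int) -> list[int]:
--     # Closed-form slot index per round: no gaps array, no prefix accumulation.
--     if required_rounds <= 0:
--         return []
--     extra = max(0, slot_count - required_rounds)
--     out = [0]
--     for r in range(1, required_rounds):
--         n = (r + 1) * (extra + 1)
--         out.append(r + min(extra, (n + required_rounds - 1) // required_rounds - 1))
--     return out
-- ===== Notes on version B (the rewrite author's own statement) =====
-- stated objective: simpler
-- what changed: Replaces the gaps array built by the first loop plus the prefix-accumulating second loop with a single loop computing each slot index by a closed-form ceiling-division formula.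
import Mathlib
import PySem

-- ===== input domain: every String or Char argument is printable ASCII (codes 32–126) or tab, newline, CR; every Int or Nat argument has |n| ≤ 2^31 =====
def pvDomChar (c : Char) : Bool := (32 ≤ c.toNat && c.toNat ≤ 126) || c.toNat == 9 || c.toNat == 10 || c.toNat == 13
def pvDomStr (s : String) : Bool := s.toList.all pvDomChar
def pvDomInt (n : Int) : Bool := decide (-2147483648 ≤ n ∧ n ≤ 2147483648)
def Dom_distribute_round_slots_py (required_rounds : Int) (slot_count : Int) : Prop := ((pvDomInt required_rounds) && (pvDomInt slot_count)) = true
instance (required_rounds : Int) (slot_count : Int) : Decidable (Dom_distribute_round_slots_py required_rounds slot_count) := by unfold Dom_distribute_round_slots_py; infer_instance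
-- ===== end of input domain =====

-- B replaces A's gaps array + prefix accumulation with one loop computing each slot index in closed form (objective: simpler).

-- ===== PORT A =====
def distribute_round_slots_py (required_rounds : Int) (slot_count : Int) : List Int :=
  let extra_slots := slot_count - required_rounds
  -- gaps_after_round = [0] * required_rounds; then the first for-loop.
  -- gaps_after_round[max(0, target_index)] += 1 : List.modify at the (nonnegative) index;
  -- Pre_ guarantees the index is in range (Python raises IndexError outside Pre_).
  let gaps := (PySem.List.pyRange 0 extra_slots 1).foldl
    (fun g extra_index =>
      let target_index := PySem.Int.floordiv ((extra_index + 1) * required_rounds) (extra_slots + 1) - 1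
      g.modify (max 0 target_index).toNat (· + 1))
    (List.replicate required_rounds.toNat 0)
  -- second for-loop: append current_slot, then advance it by 1 + gaps_after_round[round_index]
  ((PySem.List.pyRange 0 required_rounds 1).foldl
    (fun (acc : List Int × Int) round_index =>
      (acc.1 ++ [acc.2], acc.2 + 1 + PySem.List.pyGetD gaps round_index 0))
    ([], 0)).1

-- ===== PORT B =====
def distribute_round_slots_py_alt (required_rounds : Int) (slot_count : Int) : List Int :=
  if required_rounds ≤ 0 then []
  else
    let extra := max 0 (slot_count - required_rounds)
    (PySem.List.pyRange 1 required_rounds 1).foldl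
      (fun out r =>
        let n := (r + 1) * (extra + 1)
        out ++ [r + min extra (PySem.Int.floordiv (n + required_rounds - 1) required_rounds - 1)])
      [0]

-- ===== PRECONDITION & SPEC =====
-- Pre_ excludes exactly the inputs where A raises IndexError: required_rounds ≤ 0 with
-- slot_count > required_rounds makes A index into the empty gaps list.
def Pre_distribute_round_slots_py (required_rounds : Int) (slot_count : Int) : Prop :=
  1 ≤ required_rounds ∨ slot_count ≤ required_rounds
instance (required_rounds : Int) (slot_count : Int) : Decidable (Pre_distribute_round_slots_py required_rounds slot_count) := by unfold Pre_distribute_round_slots_py; infer_instance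
def pvWitness_distribute_round_slots_py : Int × Int := (3, 7)

def Spec_distribute_round_slots_py (required_rounds : Int) (slot_count : Int) (out : List Int) : Prop := out = distribute_round_slots_py_alt required_rounds slot_count
instance (required_rounds : Int) (slot_count : Int) (out : List Int) : Decidable (Spec_distribute_round_slots_py required_rounds slot_count out) := by unfold Spec_distribute_round_slots_py; infer_instance

-- ===== CLAIM (what is proved, stated in full; the proofs are below) =====
def Claim_equal_distribute_round_slots_py : Prop := ∀ (required_rounds : Int) (slot_count : Int), Dom_distribute_round_slots_py required_rounds slot_count → Pre_distribute_round_slots_py required_rounds slot_count → Spec_distribute_round_slots_py required_rounds slot_count (distribute_round_slots_py required_rounds slot_count)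

-- ===== LEMMAS AND PROOFS =====

-- one modify step shifts the prefix sum by 1 exactly when the position lies in the prefix
lemma sum_take_modify (g : List Int) (p k : Nat) (hp : p < g.length) :
    ((g.modify p (· + 1)).take k).sum = (g.take k).sum + (if p < k then 1 else 0) := by
  induction g generalizing p k with
  | nil => simp at hp
  | cons x xs ih =>
    cases p with
    | zero =>
      cases k with
      | zero => simp
      | succ k' => simp [List.modify]; ring
    | succ p' =>
      cases k with
      | zero => simp
      | succ k' =>
        have := ih p' k' (by simpa using hp)
        simp only [List.modify_succ_cons, List.take_succ_cons, List.sum_cons, this]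
        split <;> split <;> omega

-- the whole gaps-building fold, prefix-sum view
lemma sum_take_foldl_modify (es : List Int) (pos : Int → Nat) (g : List Int) (k : Nat)
    (h : ∀ e ∈ es, pos e < g.length) :
    ((es.foldl (fun g e => g.modify (pos e) (· + 1)) g).take k).sum
      = (g.take k).sum + (es.countP (fun e => decide (pos e < k)) : Int) := by
  induction es generalizing g with
  | nil => simp
  | cons e es ih =>
    simp only [List.foldl_cons, List.countP_cons]
    rw [ih _ (fun e' he' => by simpa using h e' (List.mem_cons_of_mem _ he'))]
    rw [sum_take_modify g (pos e) k (h e (List.mem_cons_self))]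
    by_cases hc : pos e < k
    · simp [hc]; ring
    · simp [hc]

lemma length_foldl_modify (es : List Int) (pos : Int → Nat) (g : List Int) :
    (es.foldl (fun g e => g.modify (pos e) (· + 1)) g).length = g.length := by
  induction es generalizing g with
  | nil => rfl
  | cons e es ih => simp [ih]

-- counting {k ∈ range n | k < q}
lemma countP_range_lt (n q : Nat) :
    (List.range n).countP (fun k => decide (k < q)) = min n q := by
  induction n with
  | zero => simp
  | succ n ih =>
    rw [List.range_succ, List.countP_append, ih]
    by_cases h : n < q <;> simp [h] <;> omega

-- A's second loop produces k + prefix-sum of gaps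
lemma loopA (g : List Int) (n : Nat) (h : n ≤ g.length) :
    (((List.range n).map Int.ofNat).foldl
      (fun (acc : List Int × Int) j => (acc.1 ++ [acc.2], acc.2 + 1 + PySem.List.pyGetD g j 0))
      ([], 0))
    = ((List.range n).map (fun (k : Nat) => (k : Int) + (g.take k).sum), (n : Int) + (g.take n).sum) := by
  induction n with
  | zero => simp
  | succ n ih =>
    rw [List.range_succ, List.map_append, List.foldl_append, ih (by omega)]
    simp only [List.map_cons, List.map_nil, List.foldl_cons, List.foldl_nil, List.map_append]
    refine Prod.ext (by simp) ?_
    have hn : n < g.length := by omega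
    have hsum : (g.take (n + 1)).sum = (g.take n).sum + g[n] := List.sum_take_succ g n hn
    have hget : PySem.List.pyGetD g (Int.ofNat n) 0 = g[n] := by
      rw [show (Int.ofNat n) = ((n : Nat) : Int) from rfl, PySem.List.pyGetD_natCast]
      simp [List.getD_eq_getElem?_getD, hn]
    simp only [hget, hsum]
    push_cast
    ring

-- B's loop is an append-map
lemma loopB (l : List Int) (init : List Int) (f : Int → Int) :
    l.foldl (fun out r => out ++ [f r]) init = init ++ l.map f := by
  induction l generalizing init with
  | nil => simp
  | cons x xs ih => simp [ih]

-- per-element equivalence of A's gap-target condition with B's ceiling-division bound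
lemma elem_iff (R E e : Int) (hR : 1 ≤ R) (hE : 1 ≤ E) (k : Nat) :
    ((max 0 (PySem.Int.floordiv ((e + 1) * R) (E + 1) - 1)).toNat < k + 1
      ↔ e < PySem.Int.floordiv (((k : Int) + 2) * (E + 1) + R - 1) R - 1) := by
  have h1 : PySem.Int.floordiv ((e + 1) * R) (E + 1) < (k : Int) + 2
      ↔ (e + 1) * R < ((k : Int) + 2) * (E + 1) :=
    PySem.Int.floordiv_lt_iff_lt_mul (by omega)
  have h2 : (e + 2) ≤ PySem.Int.floordiv (((k : Int) + 2) * (E + 1) + R - 1) R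
      ↔ (e + 2) * R ≤ ((k : Int) + 2) * (E + 1) + R - 1 :=
    PySem.Int.le_floordiv_iff_mul_le (by omega)
  have hmul : (e + 2) * R = (e + 1) * R + R := by ring
  omega

-- the prefix count of gap targets below k+1 equals B's closed form
lemma count_eq (R E : Int) (hR : 1 ≤ R) (k : Nat) :
    (((PySem.List.pyRange 0 E 1).countP
        (fun e => decide ((max 0 (PySem.Int.floordiv ((e + 1) * R) (E + 1) - 1)).toNat < k + 1))) : Int)
      = min (max 0 E) (PySem.Int.floordiv (((k : Int) + 2) * (max 0 E + 1) + R - 1) R - 1) := by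
  by_cases hE : E ≤ 0
  · have h0 : max 0 E = 0 := by omega
    rw [PySem.List.pyRange_one_eq_nil (by omega), h0]
    have hC : (1 : Int) ≤ PySem.Int.floordiv (((k : Int) + 2) * (0 + 1) + R - 1) R := by
      rw [PySem.Int.le_floordiv_iff_mul_le (by omega)]; omega
    simp only [List.countP_nil]
    omega
  · have hE1 : 1 ≤ E := by omega
    have h0 : max 0 E = E := by omega
    rw [h0]
    set C := PySem.Int.floordiv (((k : Int) + 2) * (E + 1) + R - 1) R with hCdef
    have hC1 : (1 : Int) ≤ C := by
      rw [hCdef, PySem.Int.le_floordiv_iff_mul_le (by omega)]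
      nlinarith
    rw [List.countP_congr (q := fun e => decide (e < C - 1))
        (fun e _ => by simpa using elem_iff R E e hR hE1 k)]
    rw [PySem.List.pyRange_one]
    rw [List.countP_map]
    rw [List.countP_congr (q := fun m => decide (m < (C - 1).toNat))
        (fun m _ => by simp only [Function.comp]; simpa using by omega)]
    rw [countP_range_lt]
    omega

-- ===== VERDICT (by name: the statement is the Claim_ definition above) =====
theorem distribute_round_slots_py_spec : Claim_equal_distribute_round_slots_py := by
  intro R S _ hpre
  unfold Spec_distribute_round_slots_py distribute_round_slots_py distribute_round_slots_py_alt
  simp only []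
  by_cases hR : R ≤ 0
  · have hSR : S ≤ R := by rcases hpre with h | h; omega; exact h
    rw [PySem.List.pyRange_one_eq_nil (by omega : (R : Int) ≤ 0)]
    simp [hR]
  · -- main case: required_rounds ≥ 1
    have hR1 : (1 : Int) ≤ R := by omega
    rw [if_neg hR]
    set E := S - R with hEdef
    set pos : Int → Nat :=
      fun e => (max 0 (PySem.Int.floordiv ((e + 1) * R) (E + 1) - 1)).toNat with hposdef
    -- gaps fold is the modify fold with position function pos
    have hstep : (fun (g : List Int) extra_index =>
        g.modify (max 0 (PySem.Int.floordiv ((extra_index + 1) * R) (E + 1) - 1)).toNat (· + 1))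
        = fun g e => g.modify (pos e) (· + 1) := rfl
    rw [hstep]
    set gaps := (PySem.List.pyRange 0 E 1).foldl
      (fun g e => g.modify (pos e) (· + 1)) (List.replicate R.toNat (0 : Int)) with hgapsdef
    have hlen : gaps.length = R.toNat := by
      rw [hgapsdef, length_foldl_modify]; simp
    have hposlt : ∀ e ∈ PySem.List.pyRange 0 E 1, pos e < (List.replicate R.toNat (0:Int)).length := by
      intro e he
      rw [PySem.List.mem_pyRange_one] at he
      have hfd : PySem.Int.floordiv ((e + 1) * R) (E + 1) < R := by
        rw [PySem.Int.floordiv_lt_iff_lt_mul (by omega)]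
        nlinarith
      simp only [List.length_replicate, hposdef]
      omega
    -- second loop of A
    have hrange : PySem.List.pyRange 0 R 1 = (List.range R.toNat).map Int.ofNat := by
      rw [PySem.List.pyRange_one]
      simp
    rw [hrange, loopA gaps R.toNat (by omega)]
    -- B's loop
    rw [loopB (PySem.List.pyRange 1 R 1) [0]
        (fun r => r + min (max 0 (S - R))
          (PySem.Int.floordiv ((r + 1) * (max 0 (S - R) + 1) + R - 1) R - 1))]
    -- both sides as maps over ranges
    have hm : R.toNat = (R - 1).toNat + 1 := by omega
    rw [PySem.List.pyRange_one (a := 1) (b := R)]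
    rw [hm, List.range_succ_eq_map]
    simp only [List.map_cons, List.map_map]
    simp only [Nat.cast_zero, List.take_zero, List.sum_nil, add_zero, List.singleton_append]
    refine congrArg (List.cons 0) (List.map_congr_left ?_)
    intro k hk
    rw [List.mem_range] at hk
    -- prefix sum of gaps = count = closed form
    have hsum : (gaps.take (k + 1)).sum
        = ((PySem.List.pyRange 0 E 1).countP (fun e => decide (pos e < k + 1)) : Int) := by
      rw [hgapsdef, sum_take_foldl_modify _ _ _ _ hposlt]
      simp
    simp only [Function.comp]
    rw [hsum, hposdef]
    rw [count_eq R E hR1 k]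
    simp only [hEdef]
    push_cast
    ring_nf
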